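-- pv_equiv track=rewrite | github.com/matfystutor/lokaler | lokaleplan/views.py | compute_interesting_rows
-- ===== SOURCE A (Python) =====
-- def compute_interesting_rows(row_cells):
--     # A row is uninteresting if no event starts or ends in it.
--     # Compute a list u such that u[i] is False iff row i is uninteresting.
--     if len(row_cells) < 2:
--         return [True] * len(row_cells)
--     first = [any(row_cells[0])]
--     last = [any(row_cells[-1])]
--     prev_cur_next = zip(row_cells[:-2], row_cells[1:-1], row_cells[2:])
--     mid = [
--         any(c and (c != p or c != n)
--             for p, c, n in zip(prev, cur, next))
--         for prev, cur, next in prev_cur_next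
--     ]
--     return first + mid + last
-- ===== SOURCE B (Python) =====
-- def compute_interesting_rows(row_cells):
--     # A row is uninteresting if no event starts or ends in it.
--     if len(row_cells) < 2:
--         return [True] * len(row_cells)
--     # Compare each adjacent pair of rows once; changed[k][j] says whether
--     # column j changes between row k and row k+1.
--     changed = [[a != b for a, b in zip(r1, r2)]
--                for r1, r2 in zip(row_cells, row_cells[1:])]
--     result = [any(row_cells[0])]
--     for cur, up, down in zip(row_cells[1:], changed, changed[1:]):
--         result.append(any(c and (u or d) for c, u, d in zip(cur, up, down)))
--     result.append(any(row_cells[-1]))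
--     return result
-- ===== Notes on version B (the rewrite author's own statement) =====
-- stated objective: alternative
-- what changed: Instead of zipping three slice-shifted copies of the grid into prev/cur/next windows, B computes one per-adjacent-pair column change mask and each middle row combines its cell truthiness with the mask above and the mask below, so every adjacent row pair is compared once and the result reused for both rows it touches.
import Mathlib
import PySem

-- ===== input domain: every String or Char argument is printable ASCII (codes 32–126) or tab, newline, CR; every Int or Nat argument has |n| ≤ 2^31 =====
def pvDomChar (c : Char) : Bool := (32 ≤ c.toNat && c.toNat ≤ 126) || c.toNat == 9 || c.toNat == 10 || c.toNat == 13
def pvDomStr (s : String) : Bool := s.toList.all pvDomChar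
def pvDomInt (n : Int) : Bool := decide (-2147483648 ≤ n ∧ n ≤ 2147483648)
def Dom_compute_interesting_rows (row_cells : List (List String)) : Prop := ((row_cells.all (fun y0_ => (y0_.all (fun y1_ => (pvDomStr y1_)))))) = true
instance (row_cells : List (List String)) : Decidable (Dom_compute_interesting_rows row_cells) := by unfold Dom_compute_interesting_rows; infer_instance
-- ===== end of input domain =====

-- B compares each adjacent pair of rows once into a per-pair change mask shared by the
-- two rows it touches, instead of A's three-row slice windows (objective: alternative).

-- ===== PORT A =====
-- literal transliteration of A: slice windows rc[:-2], rc[1:-1], rc[2:], zipped;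
-- Python truthiness of a string cell is s != "".
def compute_interesting_rows (row_cells : List (List String)) : List Bool :=
  if row_cells.length < 2 then List.replicate row_cells.length true
  else
    let first := [(PySem.List.pyGetD row_cells (0 : Int) []).any (fun s => s != "")]
    let last := [(PySem.List.pyGetD row_cells (-1 : Int) []).any (fun s => s != "")]
    let prev_cur_next :=
      ((PySem.List.slice row_cells none (some (-2))).zip
        (PySem.List.slice row_cells (some 1) (some (-1)))).zip
        (PySem.List.slice row_cells (some 2) none)
    let mid := prev_cur_next.map (fun w =>
      ((w.1.1.zip w.1.2).zip w.2).any (fun y =>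
        (y.1.2 != "") && (y.1.2 != y.1.1 || y.1.2 != y.2)))
    first ++ mid ++ last

-- ===== PORT B =====
-- changed[k][j] says whether column j changes between rows k and k+1;
-- each adjacent pair is compared once and its mask reused for both neighbours.
def compute_interesting_rows_alt (row_cells : List (List String)) : List Bool :=
  if row_cells.length < 2 then List.replicate row_cells.length true
  else
    let changed := (row_cells.zip (PySem.List.slice row_cells (some 1) none)).map
      (fun p => (p.1.zip p.2).map (fun q => q.1 != q.2))
    let first := [(PySem.List.pyGetD row_cells (0 : Int) []).any (fun s => s != "")]
    let mid := (((PySem.List.slice row_cells (some 1) none).zip changed).zip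
        (PySem.List.slice changed (some 1) none)).map
      (fun w => ((w.1.1.zip w.1.2).zip w.2).any (fun y =>
        (y.1.1 != "") && (y.1.2 || y.2)))
    first ++ mid ++ [(PySem.List.pyGetD row_cells (-1 : Int) []).any (fun s => s != "")]

-- ===== PRECONDITION & SPEC =====
def Spec_compute_interesting_rows (row_cells : List (List String)) (out : List Bool) : Prop := out = compute_interesting_rows_alt row_cells
instance (row_cells : List (List String)) (out : List Bool) : Decidable (Spec_compute_interesting_rows row_cells out) := by unfold Spec_compute_interesting_rows; infer_instance

-- ===== CLAIM =====
def Claim_equal_compute_interesting_rows : Prop := ∀ (row_cells : List (List String)), Dom_compute_interesting_rows row_cells → Spec_compute_interesting_rows row_cells (compute_interesting_rows row_cells)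

-- ===== LEMMAS AND PROOFS =====

-- sliding windows of three consecutive rows
def pvWindows : List (List String) → List ((List String × List String) × List String)
  | a :: b :: c :: rest => ((a, b), c) :: pvWindows (b :: c :: rest)
  | _ => []

-- per-column change mask of two rows
def pvD2 (a b : List String) : List Bool := (a.zip b).map (fun q => q.1 != q.2)

lemma pv_slice_1_neg1 {α : Type} (xs : List α) :
    PySem.List.slice xs (some 1) (some (-1)) = xs.tail.take (xs.length - 2) := by
  cases xs with
  | nil => simp [PySem.List.slice, PySem.List.clampIdx]
  | cons h t =>
    simp [PySem.List.slice, PySem.List.clampIdx]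
    split <;> omega

lemma pv_slice_from2 {α : Type} (xs : List α) :
    PySem.List.slice xs (some 2) none = xs.drop 2 := by
  rcases xs with _ | ⟨a, t⟩
  · simp [PySem.List.slice, PySem.List.clampIdx]
  rcases t with _ | ⟨b, t⟩
  · simp [PySem.List.slice, PySem.List.clampIdx]
  simp [PySem.List.slice, PySem.List.clampIdx]

-- A's triple slice-zip is the window list
lemma pv_zipA : ∀ (rest : List (List String)) (a b : List String),
    (((a :: b :: rest).take ((a :: b :: rest).length - 2)).zip
      ((b :: rest).take ((a :: b :: rest).length - 2))).zip rest
    = pvWindows (a :: b :: rest) := by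
  intro rest
  induction rest with
  | nil => intro a b; simp [pvWindows]
  | cons c r ih =>
    intro a b
    have h2 := ih b c
    simp only [List.length_cons] at h2 ⊢
    simp only [show r.length + 1 + 1 + 1 - 2 = r.length + 1 from by omega,
               show r.length + 1 + 1 - 2 = r.length from by omega] at h2 ⊢
    simp only [List.take_succ_cons, List.zip_cons_cons, pvWindows]
    rw [h2]

-- B's mask zips are the window list, transformed
lemma pv_zipB : ∀ (rest : List (List String)) (a b : List String),
    ((b :: rest).zip (((a :: b :: rest).zip (b :: rest)).map (fun p => pvD2 p.1 p.2))).zip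
      ((((a :: b :: rest).zip (b :: rest)).map (fun p => pvD2 p.1 p.2)).tail)
    = (pvWindows (a :: b :: rest)).map (fun w => ((w.1.2, pvD2 w.1.1 w.1.2), pvD2 w.1.2 w.2)) := by
  intro rest
  induction rest with
  | nil => intro a b; simp [pvWindows]
  | cons c r ih =>
    intro a b
    have h := ih b c
    simp only [List.zip_cons_cons, List.map_cons, List.tail_cons, pvWindows] at h ⊢
    rw [h]

-- pointwise: A's window test equals B's mask test
lemma pv_point : ∀ (b a c : List String),
    ((a.zip b).zip c).any (fun y => (y.1.2 != "") && (y.1.2 != y.1.1 || y.1.2 != y.2))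
    = ((b.zip (pvD2 a b)).zip (pvD2 b c)).any (fun y => (y.1.1 != "") && (y.1.2 || y.2)) := by
  intro b
  induction b with
  | nil => intro a c; cases a <;> simp [pvD2]
  | cons y b' ih =>
    intro a c
    cases a with
    | nil => simp [pvD2]
    | cons x a' =>
      cases c with
      | nil => simp [pvD2]
      | cons z c' =>
        simp only [pvD2, List.zip_cons_cons, List.map_cons, List.any_cons]
        rw [← pvD2, ← pvD2, ih a' c']
        congr 1
        have : (y != x) = (x != y) := by
          simp [bne]
          cases instDecidableEqString x y with
          | isTrue h => simp [h]
          | isFalse h => simp [h, Ne.symm h]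
        rw [this]

lemma pv_main : ∀ (rc : List (List String)),
    compute_interesting_rows rc = compute_interesting_rows_alt rc := by
  intro rc
  unfold compute_interesting_rows compute_interesting_rows_alt
  by_cases h : rc.length < 2
  · simp [h]
  · simp only [h, if_false]
    rcases rc with _ | ⟨a, rc'⟩
    · exact absurd (by simp) h
    rcases rc' with _ | ⟨b, rest⟩
    · exact absurd (by simp) h
    congr 1
    congr 1
    -- middle lists
    rw [PySem.List.slice_to_neg_ofNat (a :: b :: rest) 2 (by omega), pv_slice_1_neg1,
        pv_slice_from2]
    simp only [PySem.List.slice_from_one, List.tail_cons]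
    rw [List.drop_succ_cons, List.drop_one, List.tail_cons, pv_zipA rest a b]
    rw [show (fun (p : List String × List String) => (p.1.zip p.2).map (fun q => q.1 != q.2))
          = (fun p => pvD2 p.1 p.2) from rfl]
    rw [pv_zipB rest a b, List.map_map]
    apply List.map_congr_left
    intro w _
    exact pv_point w.1.2 w.1.1 w.2

-- ===== VERDICT =====
theorem compute_interesting_rows_spec : Claim_equal_compute_interesting_rows := by
  intro rc _
  unfold Spec_compute_interesting_rows
  exact pv_main rc
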